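-- pv_equiv track=rewrite | github.com/AlanShaiju/S7-Cloud-Computing-Lab | Multi User Dynamic Client Launch/server.py | reverse_message_with_punctuation
-- ===== SOURCE A (Python) =====
-- def reverse_message_with_punctuation(message):
--     def reverse_word(word):
--         letters = [c for c in word if c.isalpha()]
--         reversed_word = ''.join(letters[::-1])
--         result = []
--         reverse_idx = 0
--         for char in word:
--             if char.isalpha():
--                 result.append(reversed_word[reverse_idx])
--                 reverse_idx += 1
--             else:
--                 result.append(char)
--         return ''.join(result)
--
--     return ' '.join(reverse_word(word) for word in message.split())
-- ===== SOURCE B (Python) =====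
-- def reverse_message_with_punctuation(message):
--     def reverse_word(word):
--         chars = list(word)
--         left, right = 0, len(chars) - 1
--         while left < right:
--             if not chars[left].isalpha():
--                 left += 1
--             elif not chars[right].isalpha():
--                 right -= 1
--             else:
--                 chars[left], chars[right] = chars[right], chars[left]
--                 left += 1
--                 right -= 1
--         return ''.join(chars)
--
--     return ' '.join(reverse_word(word) for word in message.split())
-- ===== Notes on version B (the rewrite author's own statement) =====
-- stated objective: alternative
-- what changed: reverse_word no longer extracts the letters, reverses them and re-indexes into the reversed buffer; B walks each word with two pointers from both ends, swapping letter pairs in place and skipping non-letters, so no auxiliary letters list or index counter exists.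
import Mathlib
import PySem

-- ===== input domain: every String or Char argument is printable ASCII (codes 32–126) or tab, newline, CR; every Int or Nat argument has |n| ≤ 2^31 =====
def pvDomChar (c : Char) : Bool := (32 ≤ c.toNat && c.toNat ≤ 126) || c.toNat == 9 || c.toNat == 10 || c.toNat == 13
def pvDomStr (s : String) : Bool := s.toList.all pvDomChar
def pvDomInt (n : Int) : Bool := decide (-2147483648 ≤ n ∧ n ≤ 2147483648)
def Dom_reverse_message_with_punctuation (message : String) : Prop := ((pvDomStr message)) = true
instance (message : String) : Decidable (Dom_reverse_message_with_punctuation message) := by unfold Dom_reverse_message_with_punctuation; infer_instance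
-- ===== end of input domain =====

-- B replaces A's extract-reverse-reindex reverse_word by a two-pointer swap from both ends; same values, alternative algorithm (no speed claim).

-- ===== PORT A =====
-- reverse_word of A: letters = [c for c in word if c.isalpha()]; reversed_word = ''.join(letters[::-1]);
-- then one pass appending reversed_word[reverse_idx] (always in range, so pyGetD's default is never used) or the char itself.
def pvRevWordA (w : List Char) : List Char :=
  let letters := w.filter PySem.Chars.isalpha
  let reversedWord := (PySem.List.slice? letters none none (-1)).getD []   -- letters[::-1]; step ≠ 0, never none
  let st := w.foldl (fun (st : List Char × Int) char =>
      if PySem.Chars.isalpha char then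
        (st.1 ++ [PySem.List.pyGetD reversedWord st.2 default], st.2 + 1)
      else (st.1 ++ [char], st.2)) ([], 0)
  st.1

def reverse_message_with_punctuation (message : String) : String :=
  PySem.Str.join " " ((PySem.Str.split₀ message).map (fun word => String.ofList (pvRevWordA word.toList)))

-- ===== PORT B =====
-- the while loop of B's reverse_word: left/right pointers, swap letters, skip non-letters
-- (chars[left] / chars[right] are always in range when read, so pyGetD's default is never used).
def pvLoopB (cs : List Char) (l r : Int) : List Char :=
  if h : l < r then
    if PySem.Chars.isalpha (PySem.List.pyGetD cs l default) = false then
      pvLoopB cs (l + 1) r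
    else if PySem.Chars.isalpha (PySem.List.pyGetD cs r default) = false then
      pvLoopB cs l (r - 1)
    else
      pvLoopB (PySem.List.pySetD (PySem.List.pySetD cs l (PySem.List.pyGetD cs r default)) r
                 (PySem.List.pyGetD cs l default)) (l + 1) (r - 1)
  else cs
termination_by (r - l).toNat
decreasing_by all_goals omega

def pvRevWordB (w : List Char) : List Char :=
  pvLoopB w (0 : Int) ((w.length : Int) - 1)

def reverse_message_with_punctuation_alt (message : String) : String :=
  PySem.Str.join " " ((PySem.Str.split₀ message).map (fun word => String.ofList (pvRevWordB word.toList)))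

-- ===== PRECONDITION & SPEC =====
def Spec_reverse_message_with_punctuation (message : String) (out : String) : Prop := out = reverse_message_with_punctuation_alt message
instance (message : String) (out : String) : Decidable (Spec_reverse_message_with_punctuation message out) := by unfold Spec_reverse_message_with_punctuation; infer_instance

-- ===== CLAIM (what is proved, stated in full; the proofs are below) =====
def Claim_equal_reverse_message_with_punctuation : Prop := ∀ (message : String), Dom_reverse_message_with_punctuation message → Spec_reverse_message_with_punctuation message (reverse_message_with_punctuation message)

-- ===== LEMMAS AND PROOFS =====

-- merge w ls: walk w, consuming the next element of ls at each letter and keeping other chars.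
def pvMerge : List Char → List Char → List Char
  | [], _ => []
  | c :: cs, ls =>
    if PySem.Chars.isalpha c then ls.headD default :: pvMerge cs ls.tail
    else c :: pvMerge cs ls

-- the common specification of reverse_word: merge the word with its reversed letter sequence
def pvSpecW (cs : List Char) : List Char :=
  pvMerge cs ((cs.filter PySem.Chars.isalpha).reverse)

theorem merge_append (ys zs ls : List Char) :
    pvMerge (ys ++ zs) ls = pvMerge ys ls ++ pvMerge zs (ls.drop (ys.countP PySem.Chars.isalpha)) := by
  induction ys generalizing ls with
  | nil => simp [pvMerge]
  | cons c cs ih =>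
    by_cases h : PySem.Chars.isalpha c
    · simp [pvMerge, h, ih]
    · simp [pvMerge, h, ih]

theorem merge_extra (cs ls ex : List Char)
    (h : cs.countP PySem.Chars.isalpha ≤ ls.length) :
    pvMerge cs (ls ++ ex) = pvMerge cs ls := by
  induction cs generalizing ls with
  | nil => simp [pvMerge]
  | cons c cs ih =>
    by_cases hc : PySem.Chars.isalpha c
    · have h' : cs.countP PySem.Chars.isalpha + 1 ≤ ls.length := by
        simpa [List.countP_cons, hc] using h
      cases ls with
      | nil => simp at h'
      | cons a ls' =>
        simp only [pvMerge, hc, ite_true, List.cons_append, List.headD, List.tail_cons]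
        rw [ih ls' (by simpa using h')]
    · have h' : cs.countP PySem.Chars.isalpha ≤ ls.length := by
        simpa [List.countP_cons, hc] using h
      simp [pvMerge, hc, ih ls h']

theorem specW_short (cs : List Char) (h : cs.length ≤ 1) : pvSpecW cs = cs := by
  match cs, h with
  | [], _ => rfl
  | [c], _ =>
    by_cases hc : PySem.Chars.isalpha c <;> simp [pvSpecW, pvMerge, hc]

theorem specW_cons_nonalpha (h : Char) (tl : List Char)
    (hh : PySem.Chars.isalpha h = false) : pvSpecW (h :: tl) = h :: pvSpecW tl := by
  simp [pvSpecW, pvMerge, hh]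

theorem specW_concat_nonalpha (ys : List Char) (t : Char)
    (ht : PySem.Chars.isalpha t = false) : pvSpecW (ys ++ [t]) = pvSpecW ys ++ [t] := by
  have hlen : ((ys.filter PySem.Chars.isalpha).reverse).length
      = ys.countP PySem.Chars.isalpha := by
    simp [← List.countP_eq_length_filter]
  simp only [pvSpecW, List.filter_append, List.filter_cons, ht]
  simp only [List.filter_nil, merge_append, ← hlen]
  simp [pvMerge, ht]

theorem specW_both_alpha (h : Char) (ys : List Char) (t : Char)
    (hh : PySem.Chars.isalpha h = true) (ht : PySem.Chars.isalpha t = true) :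
    pvSpecW (h :: ys ++ [t]) = t :: pvSpecW ys ++ [h] := by
  have hlen : ((ys.filter PySem.Chars.isalpha).reverse).length
      = ys.countP PySem.Chars.isalpha := by
    simp [← List.countP_eq_length_filter]
  simp only [pvSpecW, List.filter_append, List.filter_cons, hh, ht, ite_true]
  simp only [List.filter_nil, List.reverse_cons, List.reverse_append,
    List.reverse_nil, List.nil_append, List.cons_append]
  simp only [pvMerge, hh, List.headD, List.tail_cons]
  rw [merge_append]
  have hd : (((ys.filter PySem.Chars.isalpha).reverse ++ [h]).drop
      (ys.countP PySem.Chars.isalpha)) = [h] := by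
    rw [← hlen, List.drop_append_of_le_length (le_refl _)]
    simp
  rw [hd, merge_extra _ _ [h] (by omega)]
  simp [pvMerge, ht]

-- ===== A's fold equals pvSpecW =====

theorem foldA_invariant (rw : List Char) (cs : List Char) (acc : List Char) (i : Nat) :
    (cs.foldl (fun (st : List Char × Int) char =>
      if PySem.Chars.isalpha char then
        (st.1 ++ [PySem.List.pyGetD rw st.2 default], st.2 + 1)
      else (st.1 ++ [char], st.2)) (acc, (i : Int))).1
      = acc ++ pvMerge cs (rw.drop i) := by
  induction cs generalizing acc i with
  | nil => simp [pvMerge]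
  | cons c cs ih =>
    rw [List.foldl_cons]
    by_cases hc : PySem.Chars.isalpha c
    · rw [if_pos hc]
      have hcast : ((i : Int) + 1) = ((i + 1 : Nat) : Int) := by push_cast; ring
      rw [hcast, ih]
      simp [pvMerge, hc, List.tail_drop, List.append_assoc, PySem.List.pyGetD_natCast]
    · rw [if_neg hc, ih]
      simp [pvMerge, hc, List.append_assoc]

theorem revWordA_eq_specW (w : List Char) : pvRevWordA w = pvSpecW w := by
  unfold pvRevWordA
  simp only [PySem.List.slice?_none_none_neg_one, Option.getD_some]
  have := foldA_invariant ((w.filter PySem.Chars.isalpha).reverse) w [] 0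
  simpa [pvSpecW] using this

-- ===== B's two-pointer loop equals pvSpecW =====

theorem loopB_invariant (n : Nat) : ∀ (cs : List Char) (l r : Nat),
    r + 1 - l ≤ n → r < cs.length → l ≤ r + 1 →
    pvLoopB cs (l : Int) (r : Int)
      = cs.take l ++ pvSpecW ((cs.drop l).take (r + 1 - l)) ++ cs.drop (r + 1) := by
  induction n with
  | zero =>
    intro cs l r hn hr hl
    -- l = r + 1
    have hlr : l = r + 1 := by omega
    rw [pvLoopB]
    simp [hlr, specW_short, List.take_append_drop]
  | succ n ih =>
    intro cs l r hn hr hl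
    by_cases hlt : l < r
    · have hlc : l < cs.length := by omega
      have hgl : PySem.List.pyGetD cs (l : Int) default = cs[l] := by
        simp [PySem.List.pyGetD_natCast, List.getD_eq_getElem?_getD, hlc]
      have hgr : PySem.List.pyGetD cs (r : Int) default = cs[r] := by
        simp [PySem.List.pyGetD_natCast, List.getD_eq_getElem?_getD, hr]
      rw [pvLoopB]
      have hlt' : (l : Int) < (r : Int) := by exact_mod_cast hlt
      simp only [hlt', dif_pos, hgl, hgr]
      by_cases hA : PySem.Chars.isalpha cs[l] = false
      · -- skip left
        have hcast : (l : Int) + 1 = ((l + 1 : Nat) : Int) := by push_cast; ring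
        rw [hA, if_pos rfl, hcast, ih cs (l + 1) r (by omega) hr (by omega)]
        have hseg : (cs.drop l).take (r + 1 - l)
            = cs[l] :: (cs.drop (l + 1)).take (r + 1 - (l + 1)) := by
          rw [List.drop_eq_getElem_cons hlc]
          have : r + 1 - l = (r + 1 - (l + 1)) + 1 := by omega
          rw [this, List.take_succ_cons]
        rw [hseg, specW_cons_nonalpha _ _ hA]
        simp only [List.take_succ_eq_append_getElem hlc, List.append_assoc,
          List.cons_append, List.nil_append]
      · by_cases hB : PySem.Chars.isalpha cs[r] = false
        · -- skip right
          have hcast : (r : Int) - 1 = ((r - 1 : Nat) : Int) := by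
            have : 1 ≤ r := by omega
            push_cast [this]; ring
          rw [if_neg hA, hB, if_pos rfl, hcast,
            ih cs l (r - 1) (by omega) (by omega) (by omega)]
          have hr1 : r - 1 + 1 = r := by omega
          have hidx : r - l < (cs.drop l).length := by simp; omega
          have hval : (cs.drop l)[r - l] = cs[r] := by
            rw [List.getElem_drop]; congr 1; omega
          have hseg : (cs.drop l).take (r + 1 - l)
              = (cs.drop l).take (r - l) ++ [cs[r]] := by
            have : r + 1 - l = (r - l) + 1 := by omega
            rw [this, List.take_succ_eq_append_getElem hidx, hval]
          rw [hseg, specW_concat_nonalpha _ _ hB, hr1,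
            List.drop_eq_getElem_cons hr]
          simp
        · -- swap
          rw [if_neg hA, if_neg hB]
          simp only [PySem.List.pySetD_natCast]
          set cs' := (cs.set l cs[r]).set r cs[l] with hcs'
          have hlen' : cs'.length = cs.length := by simp [hcs']
          have hcast1 : (l : Int) + 1 = ((l + 1 : Nat) : Int) := by push_cast; ring
          have hcast2 : (r : Int) - 1 = ((r - 1 : Nat) : Int) := by
            have : 1 ≤ r := by omega
            push_cast [this]; ring
          rw [hcast1, hcast2, ih cs' (l + 1) (r - 1) (by omega) (by omega) (by omega)]
          have hr1 : r - 1 + 1 = r := by omega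
          -- pieces
          have htake : cs'.take (l + 1) = cs.take l ++ [cs[r]] := by
            apply List.ext_getElem
            · simp [hlen']; omega
            · intro i h1 h2
              simp only [List.getElem_take, hcs']
              by_cases hi : i < l
              · rw [List.getElem_set_ne (by omega), List.getElem_set_ne (by omega),
                  List.getElem_append_left (by simp; omega)]
                simp [List.getElem_take]
              · have : i = l := by simp [hlen'] at h1; omega
                subst this
                rw [List.getElem_set_ne (by omega), List.getElem_set_self]
                simp
          have hdrop : cs'.drop r = cs[l] :: cs.drop (r + 1) := by
            have hrlen' : r < cs'.length := by omega
            rw [List.drop_eq_getElem_cons hrlen']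
            have h1 : cs'[r]'hrlen' = cs[l] := by
              simp [hcs', List.getElem_set_self]
            have h2 : cs'.drop (r + 1) = cs.drop (r + 1) := by
              apply List.ext_getElem
              · simp [hlen']
              · intro i hh1 hh2
                simp only [List.getElem_drop, hcs']
                rw [List.getElem_set_ne (by omega), List.getElem_set_ne (by omega)]
            rw [h1, h2]
          have hmid : (cs'.drop (l + 1)).take (r - 1 + 1 - (l + 1))
              = (cs.drop (l + 1)).take (r - 1 - l) := by
            apply List.ext_getElem
            · simp [hlen']
            · intro i h1 h2
              simp only [List.getElem_take, List.getElem_drop, hcs']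
              have hi : i < r - 1 - l := by
                simp [hlen'] at h1; omega
              rw [List.getElem_set_ne (by omega), List.getElem_set_ne (by omega)]
          have hseg : (cs.drop l).take (r + 1 - l)
              = cs[l] :: (cs.drop (l + 1)).take (r - 1 - l) ++ [cs[r]] := by
            have hidx : r - l < (cs.drop l).length := by simp; omega
            have hval : (cs.drop l)[r - l] = cs[r] := by
              rw [List.getElem_drop]; congr 1; omega
            have e1 : r + 1 - l = (r - l) + 1 := by omega
            rw [e1, List.take_succ_eq_append_getElem hidx, hval,
              List.drop_eq_getElem_cons hlc, ]
            have e2 : r - l = (r - 1 - l) + 1 := by omega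
            rw [e2, List.take_succ_cons]
          rw [hmid, htake, hr1, hdrop, hseg,
            specW_both_alpha _ _ _ (by simpa using hA) (by simpa using hB)]
          simp [List.append_assoc]
    · -- l ≥ r : loop stops
      rw [pvLoopB]
      have : ¬ ((l : Int) < (r : Int)) := by exact_mod_cast hlt
      rw [dif_neg this]
      rcases (by omega : l = r ∨ l = r + 1) with hcase | hcase
      · subst hcase
        have h1 : l + 1 - l = 1 := by omega
        rw [h1, specW_short _ (by simp)]
        have : cs.take l ++ (cs.drop l).take 1 ++ cs.drop (l + 1)
            = cs.take l ++ ((cs.drop l).take 1 ++ (cs.drop l).drop 1) := by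
          simp [List.drop_drop]
        rw [this, List.take_append_drop, List.take_append_drop]
      · subst hcase
        simp [specW_short, List.take_append_drop]

theorem revWordB_eq_specW (w : List Char) : pvRevWordB w = pvSpecW w := by
  unfold pvRevWordB
  cases hw : w with
  | nil =>
    rw [pvLoopB]
    simp [pvSpecW, pvMerge]
  | cons c cs =>
    have hlen : 1 ≤ w.length := by simp [hw]
    have hcast : ((w.length : Int) - 1) = ((w.length - 1 : Nat) : Int) := by
      push_cast [hlen]; ring
    rw [← hw, hcast, show (0 : Int) = ((0 : Nat) : Int) by simp,
      loopB_invariant (w.length) w 0 (w.length - 1) (by omega) (by omega) (by omega)]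
    have : w.length - 1 + 1 = w.length := by omega
    simp [this]

theorem revWord_eq (w : List Char) : pvRevWordA w = pvRevWordB w := by
  rw [revWordA_eq_specW, revWordB_eq_specW]

-- ===== VERDICT (by name: the statement is the Claim_ definition above) =====
theorem reverse_message_with_punctuation_spec : Claim_equal_reverse_message_with_punctuation := by
  intro message _
  unfold Spec_reverse_message_with_punctuation reverse_message_with_punctuation reverse_message_with_punctuation_alt
  congr 1
  apply List.map_congr_left
  intro w _
  rw [revWord_eq]
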